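-- pv_equiv track=rewrite | github.com/INYEONGKIM/programming-fundamentals | week5/homework5_1.py | searchWidestGap
-- ===== SOURCE A (Python) =====
-- def searchWidestGap(db):
--     if db==[]:
--         return (0, -1)
--     if len(db)==1:
--         return (0, 0)
--     idx=0
--     max=db[1]-db[0]
--     for i in range(2, len(db)):
--         if db[i]-db[i-1]>max:
--             max=db[i]-db[i-1]
--             idx=i-1
--     return (max, idx)
-- ===== SOURCE B (Python) =====
-- def searchWidestGap(db):
--     if db == []:
--         return (0, -1)
--     if len(db) == 1:
--         return (0, 0)
--
--     # Divide and conquer over the range of gap indices [lo, hi):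
--     # best(lo, hi) = (widest gap db[j+1]-db[j] for j in [lo, hi), leftmost such j).
--     # Ties between halves go left (strict '>' prefers the left result), which is
--     # exactly the leftmost-argmax rule.
--     def best(lo, hi):
--         if lo + 1 < hi:
--             mid = (lo + hi) // 2
--             l = best(lo, mid)
--             r = best(mid, hi)
--             return r if r[0] > l[0] else l
--         return (db[lo + 1] - db[lo], lo)
--
--     return best(0, len(db) - 1)
-- ===== Notes on version B (the rewrite author's own statement) =====
-- stated objective: alternative
-- what changed: Replaces A's single linear left-to-right argmax loop with a divide-and-conquer recursion over the range of gap indices: each half returns its (widest gap, leftmost index) and the halves are merged with a strict '>' that prefers the left half, reproducing the leftmost tie-break.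
import Mathlib
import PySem

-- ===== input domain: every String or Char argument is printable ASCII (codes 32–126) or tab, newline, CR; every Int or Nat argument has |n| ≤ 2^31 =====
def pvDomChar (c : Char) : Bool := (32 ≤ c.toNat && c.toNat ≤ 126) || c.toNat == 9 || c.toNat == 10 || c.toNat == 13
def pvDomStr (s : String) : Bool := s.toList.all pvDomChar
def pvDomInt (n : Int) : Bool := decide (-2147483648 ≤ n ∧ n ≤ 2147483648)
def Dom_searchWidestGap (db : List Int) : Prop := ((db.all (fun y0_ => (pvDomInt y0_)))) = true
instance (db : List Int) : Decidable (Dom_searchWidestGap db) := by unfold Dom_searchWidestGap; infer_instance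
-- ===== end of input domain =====

-- B replaces A's linear argmax loop by a divide-and-conquer recursion over gap indices (left-preferring merge); objective: alternative.

-- ===== PORT A =====
def searchWidestGap (db : List Int) : Int × Int :=
  if db = [] then (0, -1)
  else if PySem.List.len db = 1 then (0, 0)
  else
    -- state (max, idx); db[i] ported as pyGetD (indices produced by range(2, len) are in range)
    (PySem.List.pyRange 2 (PySem.List.len db) 1).foldl
      (fun (st : Int × Int) (i : Int) =>
        if PySem.List.pyGetD db i 0 - PySem.List.pyGetD db (i-1) 0 > st.1 then
          (PySem.List.pyGetD db i 0 - PySem.List.pyGetD db (i-1) 0, i - 1)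
        else st)
      (PySem.List.pyGetD db 1 0 - PySem.List.pyGetD db 0 0, 0)

-- ===== PORT B =====
-- helper `best(lo, hi)` of Source B: widest gap and its leftmost index over gap indices [lo, hi)
def pvBest (db : List Int) (lo hi : Nat) : Int × Int :=
  if _h : lo + 1 < hi then
    let mid := (lo + hi) / 2
    let l := pvBest db lo mid
    let r := pvBest db mid hi
    if r.1 > l.1 then r else l
  else
    (PySem.List.pyGetD db ((lo : Int) + 1) 0 - PySem.List.pyGetD db (lo : Int) 0, (lo : Int))
termination_by hi - lo
decreasing_by all_goals omega

def searchWidestGap_alt (db : List Int) : Int × Int :=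
  if db = [] then (0, -1)
  else if PySem.List.len db = 1 then (0, 0)
  else pvBest db 0 (db.length - 1)

-- ===== PRECONDITION & SPEC =====
def Spec_searchWidestGap (db : List Int) (out : Int × Int) : Prop := out = searchWidestGap_alt db
instance (db : List Int) (out : Int × Int) : Decidable (Spec_searchWidestGap db out) := by unfold Spec_searchWidestGap; infer_instance

-- ===== CLAIM (what is proved, stated in full; the proofs are below) =====
def Claim_equal_searchWidestGap : Prop := ∀ (db : List Int), Dom_searchWidestGap db → Spec_searchWidestGap db (searchWidestGap db)

-- ===== LEMMAS AND PROOFS =====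

/-- Reference loop: scan a gap list keeping (current max, its position), position counter p. -/
def pvLoop : List Int → Int × Int → Int → Int × Int
  | [], st, _ => st
  | g :: gs, st, p => pvLoop gs (if g > st.1 then (g, p) else st) (p + 1)

def pvGaps (db : List Int) : List Int := (db.zip (db.drop 1)).map (fun p => p.2 - p.1)

def pvSeg (db : List Int) (lo hi : Nat) : List Int := ((pvGaps db).drop lo).take (hi - lo)

lemma pvGaps_length (db : List Int) : (pvGaps db).length = db.length - 1 := by
  simp [pvGaps]

lemma pvGaps_getElem (db : List Int) (k : Nat) (h1 : k + 1 < db.length) :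
    (pvGaps db)[k]'(by rw [pvGaps_length]; omega) = db[k+1]'(by omega) - db[k]'(by omega) := by
  simp [pvGaps]

lemma pvGaps_getD (db : List Int) (k : Nat) (h1 : k + 1 < db.length) :
    (pvGaps db).getD k 0 = db.getD (k+1) 0 - db.getD k 0 := by
  rw [List.getD_eq_getElem _ _ (show k < (pvGaps db).length by rw [pvGaps_length]; omega),
      List.getD_eq_getElem _ _ (show k + 1 < db.length by omega),
      List.getD_eq_getElem _ _ (show k < db.length by omega)]
  exact pvGaps_getElem db k h1

lemma pvGaps_cons (a b : Int) (rest : List Int) :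
    pvGaps (a :: b :: rest) = (b - a) :: pvGaps (b :: rest) := by
  simp [pvGaps, List.zip]

lemma pvA_fold (db : List Int) (fuel : Nat) :
    ∀ (k : Nat) (st : Int × Int), db.length - (k+1) ≤ fuel →
    (PySem.List.pyRange ((k : Int)+1) (PySem.List.len db) 1).foldl
      (fun (st : Int × Int) (i : Int) =>
        if PySem.List.pyGetD db i 0 - PySem.List.pyGetD db (i-1) 0 > st.1 then
          (PySem.List.pyGetD db i 0 - PySem.List.pyGetD db (i-1) 0, i - 1)
        else st) st
    = pvLoop ((pvGaps db).drop k) st (k : Int) := by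
  induction fuel with
  | zero =>
    intro k st hf
    rw [PySem.List.pyRange_one_eq_nil (by simp [PySem.List.len_eq]; omega),
        List.drop_eq_nil_of_le (by rw [pvGaps_length]; omega)]
    rfl
  | succ fuel ih =>
    intro k st hf
    by_cases hk : k + 1 < db.length
    · have hlt : ((k : Int)+1) < PySem.List.len db := by simp [PySem.List.len_eq]; omega
      rw [PySem.List.pyRange_one_cons hlt]
      have hg : k < (pvGaps db).length := by rw [pvGaps_length]; omega
      rw [List.drop_eq_getElem_cons hg]
      simp only [List.foldl_cons, pvLoop]
      have e1 : PySem.List.pyGetD db ((k : Int)+1) 0 = db[k+1]'(by omega) := by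
        rw [show ((k:Int)+1) = ((k+1 : Nat) : Int) by omega, PySem.List.pyGetD_natCast]
        exact List.getD_eq_getElem db 0 (by omega)
      have e2 : PySem.List.pyGetD db ((k : Int)+1-1) 0 = db[k]'(by omega) := by
        rw [show ((k:Int)+1-1) = ((k : Nat) : Int) by omega, PySem.List.pyGetD_natCast]
        exact List.getD_eq_getElem db 0 (by omega)
      rw [e1, e2, pvGaps_getElem db k (by omega)]
      have := ih (k+1) (if db[k+1]'(by omega) - db[k]'(by omega) > st.1
          then (db[k+1]'(by omega) - db[k]'(by omega), (k : Int)) else st) (by omega)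
      push_cast at this ⊢
      rw [show ((k:Int)+1-1) = (k:Int) by ring]
      exact this
    · rw [PySem.List.pyRange_one_eq_nil (by simp [PySem.List.len_eq]; omega),
          List.drop_eq_nil_of_le (by rw [pvGaps_length]; omega)]
      rfl

/-- Leftmost strict argmax of a bare gap list, positions starting at p. -/
def pvBestOpt : List Int → Int → Option (Int × Int)
  | [], _ => none
  | g :: gs, p =>
    match pvBestOpt gs (p+1) with
    | none => some (g, p)
    | some r => if r.1 > g then some r else some (g, p)

lemma pvLoop_eq_bestOpt (gs : List Int) :
    ∀ (s : Int × Int) (p : Int),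
    pvLoop gs s p = (match pvBestOpt gs p with
      | none => s
      | some r => if r.1 > s.1 then r else s) := by
  induction gs with
  | nil => intro s p; rfl
  | cons g gs ih =>
    intro s p
    simp only [pvLoop, pvBestOpt, ih]
    rcases h : pvBestOpt gs (p+1) with _ | r
    · simp
    · by_cases h1 : r.1 > g <;> by_cases h2 : g > s.1 <;>
        simp only [h1, h2, if_pos, ite_false] <;>
        split_ifs <;> first | rfl | (exfalso; omega)

lemma pvLoop_merge (gs : List Int) (l : Int × Int) (g : Int) (q p : Int) :
    pvLoop gs (if g > l.1 then (g, q) else l) p =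
      (fun r => if r.1 > l.1 then r else l) (pvLoop gs (g, q) p) := by
  rw [pvLoop_eq_bestOpt, pvLoop_eq_bestOpt]
  rcases h : pvBestOpt gs p with _ | r
  · rfl
  · simp only
    split_ifs <;> first | rfl | (exfalso; omega)

lemma pvLoop_split (xs ys : List Int) :
    ∀ (s : Int × Int) (p : Int),
    pvLoop (xs ++ ys) s p = pvLoop ys (pvLoop xs s p) (p + (xs.length : Int)) := by
  induction xs with
  | nil => intro s p; simp [pvLoop]
  | cons x xs ih =>
    intro s p
    simp only [List.cons_append, pvLoop, ih, List.length_cons]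
    congr 1
    push_cast
    ring

lemma pvSeg_length (db : List Int) (lo hi : Nat) (h : hi ≤ (pvGaps db).length) :
    (pvSeg db lo hi).length = hi - lo := by
  simp [pvSeg]; omega

lemma pvSeg_split (db : List Int) (lo mid hi : Nat) (h1 : lo ≤ mid) (h2 : mid ≤ hi) :
    pvSeg db lo hi = pvSeg db lo mid ++ pvSeg db mid hi := by
  unfold pvSeg
  have h3 : List.drop (mid - lo) (List.drop lo (pvGaps db)) = List.drop mid (pvGaps db) := by
    rw [List.drop_drop]
    congr 1
    omega
  rw [show hi - lo = (mid - lo) + (hi - mid) by omega, List.take_add, h3]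

lemma pvSeg_cons (db : List Int) (lo hi : Nat) (h : lo < hi) (hl : lo < (pvGaps db).length) :
    pvSeg db lo hi = (pvGaps db).getD lo 0 :: pvSeg db (lo+1) hi := by
  unfold pvSeg
  rw [List.drop_eq_getElem_cons hl, show hi - lo = (hi - (lo+1)) + 1 by omega,
      List.take_succ_cons, List.getD_eq_getElem _ _ hl]

lemma pvBest_eq (db : List Int) (n : Nat) :
    ∀ (lo hi : Nat), hi - lo ≤ n → lo < hi → hi ≤ (pvGaps db).length →
    pvBest db lo hi
      = pvLoop (pvSeg db (lo+1) hi) ((pvGaps db).getD lo 0, (lo : Int)) ((lo : Int) + 1) := by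
  induction n with
  | zero => intro lo hi hn hlt _; omega
  | succ n ih =>
    intro lo hi hn hlt hhi
    by_cases h : lo + 1 < hi
    · rw [pvBest, dif_pos h]
      show (if (pvBest db ((lo + hi) / 2) hi).1 > (pvBest db lo ((lo + hi) / 2)).1
          then pvBest db ((lo + hi) / 2) hi else pvBest db lo ((lo + hi) / 2)) = _
      have hmid1 : lo < (lo + hi) / 2 := by omega
      have hmid2 : (lo + hi) / 2 < hi := by omega
      rw [ih lo ((lo + hi) / 2) (by omega) hmid1 (by omega),
          ih ((lo + hi) / 2) hi (by omega) hmid2 hhi]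
      rw [pvSeg_split db (lo+1) ((lo + hi) / 2) hi (by omega) (by omega),
          pvSeg_cons db ((lo + hi) / 2) hi hmid2 (by omega),
          pvLoop_split]
      have hpos : ((lo : Int) + 1) + (((pvSeg db (lo+1) ((lo + hi) / 2)).length : Nat) : Int)
          = (((lo + hi) / 2 : Nat) : Int) := by
        rw [pvSeg_length db (lo+1) ((lo + hi) / 2) (by omega)]
        push_cast [Nat.cast_sub (by omega : lo + 1 ≤ (lo + hi) / 2)]
        ring
      rw [hpos]
      simp only [pvLoop]
      rw [pvLoop_merge]
    · have hhi1 : hi = lo + 1 := by omega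
      subst hhi1
      rw [pvBest, dif_neg h]
      have hseg : pvSeg db (lo+1) (lo+1) = [] := by simp [pvSeg]
      rw [hseg]
      simp only [pvLoop]
      have hlen : lo + 1 < db.length := by
        have := pvGaps_length db; omega
      rw [show ((lo : Int) + 1) = ((lo + 1 : Nat) : Int) by push_cast; ring,
          PySem.List.pyGetD_natCast, PySem.List.pyGetD_natCast,
          pvGaps_getD db lo hlen]

lemma pvMain (db : List Int) : searchWidestGap db = searchWidestGap_alt db := by
  match db with
  | [] => rfl
  | [a] => rfl
  | a :: b :: rest =>
    unfold searchWidestGap searchWidestGap_alt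
    have hne : (a :: b :: rest : List Int) ≠ [] := by simp
    have hlen : PySem.List.len (a :: b :: rest) ≠ 1 := by simp [PySem.List.len_eq]; omega
    simp only [hne, hlen, if_false]
    have e1 : PySem.List.pyGetD (a :: b :: rest) 1 0 = b := by
      rw [show (1:Int) = ((1:Nat):Int) from rfl, PySem.List.pyGetD_natCast]; rfl
    have e2 : PySem.List.pyGetD (a :: b :: rest) 0 0 = a := by
      rw [PySem.List.pyGetD_zero]; rfl
    have hA := pvA_fold (a :: b :: rest) (a :: b :: rest).length 1 (b - a, 0) (by omega)
    push_cast at hA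
    rw [e1, e2, hA]
    have hglen : (pvGaps (a :: b :: rest)).length = rest.length + 1 := by
      rw [pvGaps_length]; simp
    have hlc : (a :: b :: rest).length = rest.length + 2 := by simp
    have hB := pvBest_eq (a :: b :: rest) ((a :: b :: rest).length) 0
        ((a :: b :: rest).length - 1) (by omega) (by omega) (by omega)
    simp only [List.length_cons] at hB ⊢
    rw [hB]
    have hseg : pvSeg (a :: b :: rest) 1 (rest.length + 1 + 1 - 1)
        = (pvGaps (a :: b :: rest)).drop 1 := by
      unfold pvSeg
      apply List.take_of_length_le
      simp [hglen]
    have hg0 : (pvGaps (a :: b :: rest)).getD 0 0 = b - a := by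
      rw [pvGaps_cons]; rfl
    rw [hseg, hg0]
    norm_num

-- ===== VERDICT (by name: the statement is the Claim_ definition above) =====
theorem searchWidestGap_spec : Claim_equal_searchWidestGap := by
  intro db _
  show _ = _
  exact pvMain db
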